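-- pv_equiv track=rewrite | github.com/gwy15/leetcode | src/372.超级次方.py | mod_list
-- ===== SOURCE A (Python) =====
-- from typing import List
--
-- def mod_list(b: List[int], m: int) -> int:
--     res = 0
--     for i in b:
--         if res > 2000_0000:
--             res = (10 * res + i) % m
--         else:
--             res = 10 * res + i
--     return res % m
-- ===== SOURCE B (Python) =====
-- def mod_list(b, m):
--     res = 0
--     p = 1
--     for d in reversed(b):
--         res = (res + d * p) % m
--         p = (p * 10) % m
--     return res % m
-- ===== Notes on version B (the rewrite author's own statement) =====
-- stated objective: faster
-- what changed: Replaces A's left-to-right Horner accumulation (whose threshold-triggered mod still lets intermediates grow into large bigints) by a right-to-left pass over positional weights with a running power-of-ten multiplier, reducing both accumulators mod m at every step so intermediates stay bounded by |m|.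
import Mathlib
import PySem

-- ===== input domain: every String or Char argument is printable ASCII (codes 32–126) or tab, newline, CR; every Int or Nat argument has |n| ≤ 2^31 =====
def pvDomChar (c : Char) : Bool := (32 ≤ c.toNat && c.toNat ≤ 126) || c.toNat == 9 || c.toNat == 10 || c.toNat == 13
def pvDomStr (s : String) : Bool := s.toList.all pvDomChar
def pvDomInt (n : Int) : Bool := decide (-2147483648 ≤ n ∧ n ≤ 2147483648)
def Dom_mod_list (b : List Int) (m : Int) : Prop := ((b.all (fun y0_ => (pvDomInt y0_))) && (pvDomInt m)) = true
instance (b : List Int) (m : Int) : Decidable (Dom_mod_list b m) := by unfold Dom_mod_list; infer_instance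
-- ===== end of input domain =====

-- B evaluates the digit list by positional weights right-to-left with a running power-of-ten kept reduced mod m, instead of A's left-to-right Horner pass with a threshold-triggered mod; Pre_ excludes m = 0, where Python raises ZeroDivisionError.


-- ===== PORT A =====
def mod_list (b : List Int) (m : Int) : Int :=
  PySem.Int.mod
    (b.foldl (fun res i =>
      if res > 20000000 then PySem.Int.mod (10 * res + i) m else 10 * res + i) 0)
    m

-- ===== PORT B =====
def mod_list_alt (b : List Int) (m : Int) : Int :=
  let st := b.reverse.foldl
    (fun (s : Int × Int) d => (PySem.Int.mod (s.1 + d * s.2) m, PySem.Int.mod (s.2 * 10) m))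
    (0, 1)
  PySem.Int.mod st.1 m

-- ===== PRECONDITION & SPEC =====
-- Python raises ZeroDivisionError on '% m' when m = 0 (in both A and B); only that is excluded.
def Pre_mod_list (b : List Int) (m : Int) : Prop := m ≠ 0
instance (b : List Int) (m : Int) : Decidable (Pre_mod_list b m) := by unfold Pre_mod_list; infer_instance
def pvWitness_mod_list : List Int × Int := ([1, 2, 3], 7)

def Spec_mod_list (b : List Int) (m : Int) (out : Int) : Prop := out = mod_list_alt b m
instance (b : List Int) (m : Int) (out : Int) : Decidable (Spec_mod_list b m out) := by unfold Spec_mod_list; infer_instance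

-- ===== CLAIM (what is proved, stated in full; the proofs are below) =====
def Claim_equal_mod_list : Prop := ∀ (b : List Int) (m : Int), Dom_mod_list b m → Pre_mod_list b m → Spec_mod_list b m (mod_list b m)

-- ===== LEMMAS AND PROOFS =====

-- the plain positional value of the reversed digit list: Wv [d0, d1, …] = d0 + 10*d1 + 100*d2 + …
def Wv : List Int → Int
  | [] => 0
  | d :: l => d + 10 * Wv l

theorem fmod_sub_self (z m : Int) : m ∣ (Int.fmod z m - z) := by
  have h := Int.mul_fdiv_add_fmod z m
  exact ⟨-(z.fdiv m), by linarith⟩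

theorem pymod_congr {m x y : Int} (hm : m ≠ 0) (h : m ∣ x - y) :
    PySem.Int.mod x m = PySem.Int.mod y m := by
  have hx := fmod_sub_self x m
  have hy := fmod_sub_self y m
  have hd : m ∣ (PySem.Int.mod x m - PySem.Int.mod y m) := by
    have : PySem.Int.mod x m - PySem.Int.mod y m =
        (Int.fmod x m - x) - (Int.fmod y m - y) + (x - y) := by
      simp only [PySem.Int.mod]; ring
    rw [this]
    exact dvd_add (dvd_sub hx hy) h
  have hd2 : |m| ∣ PySem.Int.mod x m - PySem.Int.mod y m := (abs_dvd m _).mpr hd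
  have hz : PySem.Int.mod x m - PySem.Int.mod y m = 0 := by
    refine Int.eq_zero_of_abs_lt_dvd hd2 ?_
    rw [abs_lt]
    rcases lt_or_gt_of_ne hm with hneg | hpos
    · have b1 := PySem.Int.mod_neg_bounds x hneg
      have b2 := PySem.Int.mod_neg_bounds y hneg
      rw [abs_of_neg hneg]
      constructor <;> linarith [b1.1, b1.2, b2.1, b2.2]
    · have b1 := PySem.Int.mod_nonneg x hpos
      have b2 := PySem.Int.mod_lt x hpos
      have b3 := PySem.Int.mod_nonneg y hpos
      have b4 := PySem.Int.mod_lt y hpos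
      rw [abs_of_pos hpos]
      constructor <;> linarith
  linarith

theorem Wv_append (l : List Int) (d : Int) :
    Wv (l ++ [d]) = Wv l + d * 10 ^ l.length := by
  induction l with
  | nil => simp [Wv]
  | cons x l ih => simp [Wv, ih, pow_succ]; ring

theorem horner_eq_Wv_reverse (b : List Int) (res : Int) :
    b.foldl (fun r d => 10 * r + d) res = Wv b.reverse + res * 10 ^ b.length := by
  induction b generalizing res with
  | nil => simp [Wv]
  | cons d b ih =>
    simp only [List.foldl_cons, ih, List.reverse_cons, Wv_append, List.length_reverse,
      List.length_cons, pow_succ]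
    ring

theorem loopA_congr (m : Int) (hm : m ≠ 0) (l : List Int) :
    ∀ res res' : Int, m ∣ res - res' →
      m ∣ (l.foldl (fun res i =>
              if res > 20000000 then PySem.Int.mod (10 * res + i) m else 10 * res + i) res
            - l.foldl (fun r d => 10 * r + d) res') := by
  induction l with
  | nil => intro res res' h; simpa using h
  | cons d l ih =>
    intro res res' h
    simp only [List.foldl_cons]
    have h10 : m ∣ (10 * res + d) - (10 * res' + d) := by
      have : (10 * res + d) - (10 * res' + d) = 10 * (res - res') := by ring
      rw [this]; exact Dvd.dvd.mul_left h 10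
    by_cases hc : res > 20000000
    · simp only [if_pos hc]
      refine ih _ _ ?_
      have hf := fmod_sub_self (10 * res + d) m
      have : PySem.Int.mod (10 * res + d) m - (10 * res' + d) =
          (Int.fmod (10 * res + d) m - (10 * res + d)) + ((10 * res + d) - (10 * res' + d)) := by
        simp only [PySem.Int.mod]; ring
      rw [this]; exact dvd_add hf h10
    · simp only [if_neg hc]
      exact ih _ _ h10

theorem loopB_congr (m : Int) (hm : m ≠ 0) (l : List Int) :
    ∀ res p res' p' : Int, m ∣ res - res' → m ∣ p - p' →
      m ∣ ((l.foldl
              (fun (s : Int × Int) d =>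
                (PySem.Int.mod (s.1 + d * s.2) m, PySem.Int.mod (s.2 * 10) m))
              (res, p)).1
            - (res' + p' * Wv l)) := by
  induction l with
  | nil => intro res p res' p' h hp; simpa [Wv] using h
  | cons d l ih =>
    intro res p res' p' h hp
    simp only [List.foldl_cons]
    have hres : m ∣ PySem.Int.mod (res + d * p) m - (res' + d * p') := by
      have hf := fmod_sub_self (res + d * p) m
      have hdp : m ∣ (res + d * p) - (res' + d * p') := by
        have : (res + d * p) - (res' + d * p') = (res - res') + d * (p - p') := by ring
        rw [this]; exact dvd_add h (Dvd.dvd.mul_left hp d)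
      have : PySem.Int.mod (res + d * p) m - (res' + d * p') =
          (Int.fmod (res + d * p) m - (res + d * p)) + ((res + d * p) - (res' + d * p')) := by
        simp only [PySem.Int.mod]; ring
      rw [this]; exact dvd_add hf hdp
    have hpnew : m ∣ PySem.Int.mod (p * 10) m - p' * 10 := by
      have hf := fmod_sub_self (p * 10) m
      have : PySem.Int.mod (p * 10) m - p' * 10 =
          (Int.fmod (p * 10) m - p * 10) + (p - p') * 10 := by
        simp only [PySem.Int.mod]; ring
      rw [this]; exact dvd_add hf (Dvd.dvd.mul_right hp 10)
    have := ih (PySem.Int.mod (res + d * p) m) (PySem.Int.mod (p * 10) m)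
      (res' + d * p') (p' * 10) hres hpnew
    have heq : (res' + d * p') + p' * 10 * Wv l = res' + p' * Wv (d :: l) := by
      simp [Wv]; ring
    rw [heq] at this
    exact this

-- ===== VERDICT (by name: the statement is the Claim_ definition above) =====
theorem mod_list_spec : Claim_equal_mod_list := by
  intro b m _ hm
  unfold Spec_mod_list mod_list mod_list_alt
  have hA : m ∣ (b.foldl (fun res i =>
      if res > 20000000 then PySem.Int.mod (10 * res + i) m else 10 * res + i) 0
        - Wv b.reverse) := by
    have h := loopA_congr m hm b 0 0 (by simp)
    have he := horner_eq_Wv_reverse b 0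
    rw [he] at h; simpa using h
  have hB : m ∣ ((b.reverse.foldl
      (fun (s : Int × Int) d =>
        (PySem.Int.mod (s.1 + d * s.2) m, PySem.Int.mod (s.2 * 10) m)) (0, 1)).1
        - Wv b.reverse) := by
    have h := loopB_congr m hm b.reverse 0 1 0 1 (by simp) (by simp)
    simpa using h
  calc PySem.Int.mod (b.foldl (fun res i =>
          if res > 20000000 then PySem.Int.mod (10 * res + i) m else 10 * res + i) 0) m
      = PySem.Int.mod (Wv b.reverse) m := pymod_congr hm hA
    _ = _ := (pymod_congr hm hB).symm
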